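-- pv_equiv track=rewrite | github.com/pypi-data/pypi-mirror-392 | packages/cerc-hub/cerc_hub-0.3.1.4-py3-none-any.whl/hub/helpers/peak_loads.py | peak_loads_from_hourly
-- ===== SOURCE A (Python) =====
-- import math
--
-- _MONTH_STARTING_HOUR = [0, 744, 1416, 2160, 2880, 3624, 4344, 5088, 5832, 6552, 7296, 8016, math.inf]
--
-- def peak_loads_from_hourly(hourly_values):
--   """
--   Get peak loads from hourly
--   :return: [int]
--   """
--   month = 1
--   peaks = [0 for _ in range(12)]
--   for i in range(0, len(hourly_values)):
--     if _MONTH_STARTING_HOUR[month] <= i: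
--       month += 1
--     if hourly_values[i] > peaks[month-1]:
--       peaks[month-1] = hourly_values[i]
--   return peaks
-- ===== SOURCE B (Python) =====
-- _STARTS = [0, 744, 1416, 2160, 2880, 3624, 4344, 5088, 5832, 6552, 7296, 8016]
--
-- def peak_loads_from_hourly(hourly_values):
--   """
--   Get peak loads from hourly
--   :return: [int]
--   """
--   peaks = []
--   for m in range(12):
--     lo = _STARTS[m]
--     hi = _STARTS[m + 1] if m < 11 else len(hourly_values)
--     peaks.append(max([0, *hourly_values[lo:hi]]))
--   return peaks
-- ===== Notes on version B (the rewrite author's own statement) =====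
-- stated objective: simpler
-- what changed: Replaces A's single stateful scan (running month counter + in-place peaks updates) by 12 independent month slices, each reduced with max([0,*slice]); last slice open-ended so hours >= 8016 fall into December.
import Mathlib
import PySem

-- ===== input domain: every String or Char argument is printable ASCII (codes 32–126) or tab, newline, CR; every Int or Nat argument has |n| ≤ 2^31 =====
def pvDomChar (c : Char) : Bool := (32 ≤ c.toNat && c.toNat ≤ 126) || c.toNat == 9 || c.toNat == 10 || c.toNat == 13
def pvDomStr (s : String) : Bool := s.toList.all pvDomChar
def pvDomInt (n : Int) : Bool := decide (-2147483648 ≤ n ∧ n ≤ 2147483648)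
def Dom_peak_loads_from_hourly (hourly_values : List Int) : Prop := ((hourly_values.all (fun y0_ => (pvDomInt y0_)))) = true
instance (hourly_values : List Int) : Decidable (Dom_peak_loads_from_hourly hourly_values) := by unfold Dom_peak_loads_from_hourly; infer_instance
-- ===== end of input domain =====

-- B replaces A's single stateful scan (running month counter, in-place peak updates) by 12
-- independent month slices each reduced with max([0, *slice]); same result, simpler decomposition.

-- ===== PORT A =====
-- _MONTH_STARTING_HOUR without its final math.inf entry; the Python comparison
-- 'inf <= i' is always False, which the port renders as the 'month ≤ 11' guard.
def monthStartsA : List Int := [0, 744, 1416, 2160, 2880, 3624, 4344, 5088, 5832, 6552, 7296, 8016]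

-- one iteration of A's 'for i in range(0, len(hourly_values))' body; state = (month, peaks).
-- hourly_values[i] with 0 ≤ i < len is exact as getD.
def stepA (hourly_values : List Int) (st : Nat × List Int) (i : Nat) : Nat × List Int :=
  let month := if st.1 ≤ 11 ∧ monthStartsA.getD st.1 0 ≤ (i : Int) then st.1 + 1 else st.1
  let v := hourly_values.getD i 0
  if v > st.2.getD (month - 1) 0 then (month, st.2.set (month - 1) v) else (month, st.2)

def peak_loads_from_hourly (hourly_values : List Int) : List Int :=
  ((List.range hourly_values.length).foldl (stepA hourly_values) (1, List.replicate 12 0)).2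

-- ===== PORT B =====
def altStarts : List Nat := [0, 744, 1416, 2160, 2880, 3624, 4344, 5088, 5832, 6552, 7296, 8016]

-- hourly_values[lo:hi] with 0 ≤ lo ≤ hi is exactly (drop lo).take (hi - lo) (both clamp);
-- max([0, *slice]) is the left fold of max over the slice starting from 0.
def peak_loads_from_hourly_alt (hourly_values : List Int) : List Int :=
  (List.range 12).foldl
    (fun peaks m =>
      let lo := altStarts.getD m 0
      let hi := if m < 11 then altStarts.getD (m + 1) 0 else hourly_values.length
      peaks ++ [((hourly_values.drop lo).take (hi - lo)).foldl (fun a v => max a v) 0])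
    []

-- ===== PRECONDITION & SPEC =====
def Spec_peak_loads_from_hourly (hourly_values : List Int) (out : List Int) : Prop := out = peak_loads_from_hourly_alt hourly_values
instance (hourly_values : List Int) (out : List Int) : Decidable (Spec_peak_loads_from_hourly hourly_values out) := by unfold Spec_peak_loads_from_hourly; infer_instance

-- ===== CLAIM (what is proved, stated in full; the proofs are below) =====
def Claim_equal_peak_loads_from_hourly : Prop := ∀ (hourly_values : List Int), Dom_peak_loads_from_hourly hourly_values → Spec_peak_loads_from_hourly hourly_values (peak_loads_from_hourly hourly_values)

-- ===== LEMMAS AND PROOFS =====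

-- 1-based month containing hour i (index ≥ 8016 ⇒ month 12)
def mIdx (i : Nat) : Nat :=
  if i < 744 then 1 else if i < 1416 then 2 else if i < 2160 then 3 else if i < 2880 then 4
  else if i < 3624 then 5 else if i < 4344 then 6 else if i < 5088 then 7 else if i < 5832 then 8
  else if i < 6552 then 9 else if i < 7296 then 10 else if i < 8016 then 11 else 12

-- A's month variable before processing index n
def mState (n : Nat) : Nat := if n = 0 then 1 else mIdx (n - 1)

def chunk (xs : List Int) (m : Nat) : List Int :=
  let lo := altStarts.getD m 0
  let hi := if m < 11 then altStarts.getD (m + 1) 0 else xs.length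
  (xs.drop lo).take (hi - lo)

def bPeaks (xs : List Int) : List Int :=
  (List.range 12).map (fun m => (chunk xs m).foldl (fun a v => max a v) 0)

lemma step_month (n : Nat) :
    (if mState n ≤ 11 ∧ monthStartsA.getD (mState n) 0 ≤ (n : Int) then mState n + 1 else mState n)
      = mIdx n := by
  rcases n with _ | k
  · norm_num [mState, mIdx, monthStartsA, List.getD]
  · have hms : mState (k + 1) = mIdx k := by simp [mState]
    rw [hms]
    rcases (by omega : k + 1 < 744 ∨ (744 ≤ k + 1 ∧ k + 1 < 1416) ∨ (1416 ≤ k + 1 ∧ k + 1 < 2160) ∨ (2160 ≤ k + 1 ∧ k + 1 < 2880) ∨ (2880 ≤ k + 1 ∧ k + 1 < 3624) ∨ (3624 ≤ k + 1 ∧ k + 1 < 4344) ∨ (4344 ≤ k + 1 ∧ k + 1 < 5088) ∨ (5088 ≤ k + 1 ∧ k + 1 < 5832) ∨ (5832 ≤ k + 1 ∧ k + 1 < 6552) ∨ (6552 ≤ k + 1 ∧ k + 1 < 7296) ∨ (7296 ≤ k + 1 ∧ k + 1 < 8016) ∨ 8016 ≤ k + 1) with h|h|h|h|h|h|h|h|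h|h|h|h
    · have e1 : mIdx k = 1 := by unfold mIdx; rw [if_pos (show k < 744 by omega)]
      have e2 : mIdx (k + 1) = 1 := by unfold mIdx; rw [if_pos (show k + 1 < 744 by omega)]
      rw [e1, e2]; norm_num [monthStartsA, List.getD]; omega
    · by_cases hb : k + 1 = 744
      · have e1 : mIdx k = 1 := by unfold mIdx; rw [if_pos (show k < 744 by omega)]
        have e2 : mIdx (k + 1) = 2 := by unfold mIdx; rw [if_neg (show ¬ k + 1 < 744 by omega), if_pos (show k + 1 < 1416 by omega)]
        rw [e1, e2]; norm_num [monthStartsA, List.getD]; try omega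
      · have e1 : mIdx k = 2 := by unfold mIdx; rw [if_neg (show ¬ k < 744 by omega), if_pos (show k < 1416 by omega)]
        have e2 : mIdx (k + 1) = 2 := by unfold mIdx; rw [if_neg (show ¬ k + 1 < 744 by omega), if_pos (show k + 1 < 1416 by omega)]
        rw [e1, e2]; norm_num [monthStartsA, List.getD]; try omega
    · by_cases hb : k + 1 = 1416
      · have e1 : mIdx k = 2 := by unfold mIdx; rw [if_neg (show ¬ k < 744 by omega), if_pos (show k < 1416 by omega)]
        have e2 : mIdx (k + 1) = 3 := by unfold mIdx; rw [if_neg (show ¬ k + 1 < 744 by omega), if_neg (show ¬ k + 1 < 1416 by omega), if_pos (show k + 1 < 2160 by omega)]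
        rw [e1, e2]; norm_num [monthStartsA, List.getD]; try omega
      · have e1 : mIdx k = 3 := by unfold mIdx; rw [if_neg (show ¬ k < 744 by omega), if_neg (show ¬ k < 1416 by omega), if_pos (show k < 2160 by omega)]
        have e2 : mIdx (k + 1) = 3 := by unfold mIdx; rw [if_neg (show ¬ k + 1 < 744 by omega), if_neg (show ¬ k + 1 < 1416 by omega), if_pos (show k + 1 < 2160 by omega)]
        rw [e1, e2]; norm_num [monthStartsA, List.getD]; try omega
    · by_cases hb : k + 1 = 2160
      · have e1 : mIdx k = 3 := by unfold mIdx; rw [if_neg (show ¬ k < 744 by omega), if_neg (show ¬ k < 1416 by omega), if_pos (show k < 2160 by omega)]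
        have e2 : mIdx (k + 1) = 4 := by unfold mIdx; rw [if_neg (show ¬ k + 1 < 744 by omega), if_neg (show ¬ k + 1 < 1416 by omega), if_neg (show ¬ k + 1 < 2160 by omega), if_pos (show k + 1 < 2880 by omega)]
        rw [e1, e2]; norm_num [monthStartsA, List.getD]; try omega
      · have e1 : mIdx k = 4 := by unfold mIdx; rw [if_neg (show ¬ k < 744 by omega), if_neg (show ¬ k < 1416 by omega), if_neg (show ¬ k < 2160 by omega), if_pos (show k < 2880 by omega)]
        have e2 : mIdx (k + 1) = 4 := by unfold mIdx; rw [if_neg (show ¬ k + 1 < 744 by omega), if_neg (show ¬ k + 1 < 1416 by omega), if_neg (show ¬ k + 1 < 2160 by omega), if_pos (show k + 1 < 2880 by omega)]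
        rw [e1, e2]; norm_num [monthStartsA, List.getD]; try omega
    · by_cases hb : k + 1 = 2880
      · have e1 : mIdx k = 4 := by unfold mIdx; rw [if_neg (show ¬ k < 744 by omega), if_neg (show ¬ k < 1416 by omega), if_neg (show ¬ k < 2160 by omega), if_pos (show k < 2880 by omega)]
        have e2 : mIdx (k + 1) = 5 := by unfold mIdx; rw [if_neg (show ¬ k + 1 < 744 by omega), if_neg (show ¬ k + 1 < 1416 by omega), if_neg (show ¬ k + 1 < 2160 by omega), if_neg (show ¬ k + 1 < 2880 by omega), if_pos (show k + 1 < 3624 by omega)]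
        rw [e1, e2]; norm_num [monthStartsA, List.getD]; try omega
      · have e1 : mIdx k = 5 := by unfold mIdx; rw [if_neg (show ¬ k < 744 by omega), if_neg (show ¬ k < 1416 by omega), if_neg (show ¬ k < 2160 by omega), if_neg (show ¬ k < 2880 by omega), if_pos (show k < 3624 by omega)]
        have e2 : mIdx (k + 1) = 5 := by unfold mIdx; rw [if_neg (show ¬ k + 1 < 744 by omega), if_neg (show ¬ k + 1 < 1416 by omega), if_neg (show ¬ k + 1 < 2160 by omega), if_neg (show ¬ k + 1 < 2880 by omega), if_pos (show k + 1 < 3624 by omega)]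
        rw [e1, e2]; norm_num [monthStartsA, List.getD]; try omega
    · by_cases hb : k + 1 = 3624
      · have e1 : mIdx k = 5 := by unfold mIdx; rw [if_neg (show ¬ k < 744 by omega), if_neg (show ¬ k < 1416 by omega), if_neg (show ¬ k < 2160 by omega), if_neg (show ¬ k < 2880 by omega), if_pos (show k < 3624 by omega)]
        have e2 : mIdx (k + 1) = 6 := by unfold mIdx; rw [if_neg (show ¬ k + 1 < 744 by omega), if_neg (show ¬ k + 1 < 1416 by omega), if_neg (show ¬ k + 1 < 2160 by omega), if_neg (show ¬ k + 1 < 2880 by omega), if_neg (show ¬ k + 1 < 3624 by omega), if_pos (show k + 1 < 4344 by omega)]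
        rw [e1, e2]; norm_num [monthStartsA, List.getD]; try omega
      · have e1 : mIdx k = 6 := by unfold mIdx; rw [if_neg (show ¬ k < 744 by omega), if_neg (show ¬ k < 1416 by omega), if_neg (show ¬ k < 2160 by omega), if_neg (show ¬ k < 2880 by omega), if_neg (show ¬ k < 3624 by omega), if_pos (show k < 4344 by omega)]
        have e2 : mIdx (k + 1) = 6 := by unfold mIdx; rw [if_neg (show ¬ k + 1 < 744 by omega), if_neg (show ¬ k + 1 < 1416 by omega), if_neg (show ¬ k + 1 < 2160 by omega), if_neg (show ¬ k + 1 < 2880 by omega), if_neg (show ¬ k + 1 < 3624 by omega), if_pos (show k + 1 < 4344 by omega)]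
        rw [e1, e2]; norm_num [monthStartsA, List.getD]; try omega
    · by_cases hb : k + 1 = 4344
      · have e1 : mIdx k = 6 := by unfold mIdx; rw [if_neg (show ¬ k < 744 by omega), if_neg (show ¬ k < 1416 by omega), if_neg (show ¬ k < 2160 by omega), if_neg (show ¬ k < 2880 by omega), if_neg (show ¬ k < 3624 by omega), if_pos (show k < 4344 by omega)]
        have e2 : mIdx (k + 1) = 7 := by unfold mIdx; rw [if_neg (show ¬ k + 1 < 744 by omega), if_neg (show ¬ k + 1 < 1416 by omega), if_neg (show ¬ k + 1 < 2160 by omega), if_neg (show ¬ k + 1 < 2880 by omega), if_neg (show ¬ k + 1 < 3624 by omega), if_neg (show ¬ k + 1 < 4344 by omega), if_pos (show k + 1 < 5088 by omega)]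
        rw [e1, e2]; norm_num [monthStartsA, List.getD]; try omega
      · have e1 : mIdx k = 7 := by unfold mIdx; rw [if_neg (show ¬ k < 744 by omega), if_neg (show ¬ k < 1416 by omega), if_neg (show ¬ k < 2160 by omega), if_neg (show ¬ k < 2880 by omega), if_neg (show ¬ k < 3624 by omega), if_neg (show ¬ k < 4344 by omega), if_pos (show k < 5088 by omega)]
        have e2 : mIdx (k + 1) = 7 := by unfold mIdx; rw [if_neg (show ¬ k + 1 < 744 by omega), if_neg (show ¬ k + 1 < 1416 by omega), if_neg (show ¬ k + 1 < 2160 by omega), if_neg (show ¬ k + 1 < 2880 by omega), if_neg (show ¬ k + 1 < 3624 by omega), if_neg (show ¬ k + 1 < 4344 by omega), if_pos (show k + 1 < 5088 by omega)]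
        rw [e1, e2]; norm_num [monthStartsA, List.getD]; try omega
    · by_cases hb : k + 1 = 5088
      · have e1 : mIdx k = 7 := by unfold mIdx; rw [if_neg (show ¬ k < 744 by omega), if_neg (show ¬ k < 1416 by omega), if_neg (show ¬ k < 2160 by omega), if_neg (show ¬ k < 2880 by omega), if_neg (show ¬ k < 3624 by omega), if_neg (show ¬ k < 4344 by omega), if_pos (show k < 5088 by omega)]
        have e2 : mIdx (k + 1) = 8 := by unfold mIdx; rw [if_neg (show ¬ k + 1 < 744 by omega), if_neg (show ¬ k + 1 < 1416 by omega), if_neg (show ¬ k + 1 < 2160 by omega), if_neg (show ¬ k + 1 < 2880 by omega), if_neg (show ¬ k + 1 < 3624 by omega), if_neg (show ¬ k + 1 < 4344 by omega), if_neg (show ¬ k + 1 < 5088 by omega), if_pos (show k + 1 < 5832 by omega)]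
        rw [e1, e2]; norm_num [monthStartsA, List.getD]; try omega
      · have e1 : mIdx k = 8 := by unfold mIdx; rw [if_neg (show ¬ k < 744 by omega), if_neg (show ¬ k < 1416 by omega), if_neg (show ¬ k < 2160 by omega), if_neg (show ¬ k < 2880 by omega), if_neg (show ¬ k < 3624 by omega), if_neg (show ¬ k < 4344 by omega), if_neg (show ¬ k < 5088 by omega), if_pos (show k < 5832 by omega)]
        have e2 : mIdx (k + 1) = 8 := by unfold mIdx; rw [if_neg (show ¬ k + 1 < 744 by omega), if_neg (show ¬ k + 1 < 1416 by omega), if_neg (show ¬ k + 1 < 2160 by omega), if_neg (show ¬ k + 1 < 2880 by omega), if_neg (show ¬ k + 1 < 3624 by omega), if_neg (show ¬ k + 1 < 4344 by omega), if_neg (show ¬ k + 1 < 5088 by omega), if_pos (show k + 1 < 5832 by omega)]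
        rw [e1, e2]; norm_num [monthStartsA, List.getD]; try omega
    · by_cases hb : k + 1 = 5832
      · have e1 : mIdx k = 8 := by unfold mIdx; rw [if_neg (show ¬ k < 744 by omega), if_neg (show ¬ k < 1416 by omega), if_neg (show ¬ k < 2160 by omega), if_neg (show ¬ k < 2880 by omega), if_neg (show ¬ k < 3624 by omega), if_neg (show ¬ k < 4344 by omega), if_neg (show ¬ k < 5088 by omega), if_pos (show k < 5832 by omega)]
        have e2 : mIdx (k + 1) = 9 := by unfold mIdx; rw [if_neg (show ¬ k + 1 < 744 by omega), if_neg (show ¬ k + 1 < 1416 by omega), if_neg (show ¬ k + 1 < 2160 by omega), if_neg (show ¬ k + 1 < 2880 by omega), if_neg (show ¬ k + 1 < 3624 by omega), if_neg (show ¬ k + 1 < 4344 by omega), if_neg (show ¬ k + 1 < 5088 by omega), if_neg (show ¬ k + 1 < 5832 by omega), if_pos (show k + 1 < 6552 by omega)]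
        rw [e1, e2]; norm_num [monthStartsA, List.getD]; try omega
      · have e1 : mIdx k = 9 := by unfold mIdx; rw [if_neg (show ¬ k < 744 by omega), if_neg (show ¬ k < 1416 by omega), if_neg (show ¬ k < 2160 by omega), if_neg (show ¬ k < 2880 by omega), if_neg (show ¬ k < 3624 by omega), if_neg (show ¬ k < 4344 by omega), if_neg (show ¬ k < 5088 by omega), if_neg (show ¬ k < 5832 by omega), if_pos (show k < 6552 by omega)]
        have e2 : mIdx (k + 1) = 9 := by unfold mIdx; rw [if_neg (show ¬ k + 1 < 744 by omega), if_neg (show ¬ k + 1 < 1416 by omega), if_neg (show ¬ k + 1 < 2160 by omega), if_neg (show ¬ k + 1 < 2880 by omega), if_neg (show ¬ k + 1 < 3624 by omega), if_neg (show ¬ k + 1 < 4344 by omega), if_neg (show ¬ k + 1 < 5088 by omega), if_neg (show ¬ k + 1 < 5832 by omega), if_pos (show k + 1 < 6552 by omega)]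
        rw [e1, e2]; norm_num [monthStartsA, List.getD]; try omega
    · by_cases hb : k + 1 = 6552
      · have e1 : mIdx k = 9 := by unfold mIdx; rw [if_neg (show ¬ k < 744 by omega), if_neg (show ¬ k < 1416 by omega), if_neg (show ¬ k < 2160 by omega), if_neg (show ¬ k < 2880 by omega), if_neg (show ¬ k < 3624 by omega), if_neg (show ¬ k < 4344 by omega), if_neg (show ¬ k < 5088 by omega), if_neg (show ¬ k < 5832 by omega), if_pos (show k < 6552 by omega)]
        have e2 : mIdx (k + 1) = 10 := by unfold mIdx; rw [if_neg (show ¬ k + 1 < 744 by omega), if_neg (show ¬ k + 1 < 1416 by omega), if_neg (show ¬ k + 1 < 2160 by omega), if_neg (show ¬ k + 1 < 2880 by omega), if_neg (show ¬ k + 1 < 3624 by omega), if_neg (show ¬ k + 1 < 4344 by omega), if_neg (show ¬ k + 1 < 5088 by omega), if_neg (show ¬ k + 1 < 5832 by omega), if_neg (show ¬ k + 1 < 6552 by omega), if_pos (show k + 1 < 7296 by omega)]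
        rw [e1, e2]; norm_num [monthStartsA, List.getD]; try omega
      · have e1 : mIdx k = 10 := by unfold mIdx; rw [if_neg (show ¬ k < 744 by omega), if_neg (show ¬ k < 1416 by omega), if_neg (show ¬ k < 2160 by omega), if_neg (show ¬ k < 2880 by omega), if_neg (show ¬ k < 3624 by omega), if_neg (show ¬ k < 4344 by omega), if_neg (show ¬ k < 5088 by omega), if_neg (show ¬ k < 5832 by omega), if_neg (show ¬ k < 6552 by omega), if_pos (show k < 7296 by omega)]
        have e2 : mIdx (k + 1) = 10 := by unfold mIdx; rw [if_neg (show ¬ k + 1 < 744 by omega), if_neg (show ¬ k + 1 < 1416 by omega), if_neg (show ¬ k + 1 < 2160 by omega), if_neg (show ¬ k + 1 < 2880 by omega), if_neg (show ¬ k + 1 < 3624 by omega), if_neg (show ¬ k + 1 < 4344 by omega), if_neg (show ¬ k + 1 < 5088 by omega), if_neg (show ¬ k + 1 < 5832 by omega), if_neg (show ¬ k + 1 < 6552 by omega), if_pos (show k + 1 < 7296 by omega)]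
        rw [e1, e2]; norm_num [monthStartsA, List.getD]; try omega
    · by_cases hb : k + 1 = 7296
      · have e1 : mIdx k = 10 := by unfold mIdx; rw [if_neg (show ¬ k < 744 by omega), if_neg (show ¬ k < 1416 by omega), if_neg (show ¬ k < 2160 by omega), if_neg (show ¬ k < 2880 by omega), if_neg (show ¬ k < 3624 by omega), if_neg (show ¬ k < 4344 by omega), if_neg (show ¬ k < 5088 by omega), if_neg (show ¬ k < 5832 by omega), if_neg (show ¬ k < 6552 by omega), if_pos (show k < 7296 by omega)]
        have e2 : mIdx (k + 1) = 11 := by unfold mIdx; rw [if_neg (show ¬ k + 1 < 744 by omega), if_neg (show ¬ k + 1 < 1416 by omega), if_neg (show ¬ k + 1 < 2160 by omega), if_neg (show ¬ k + 1 < 2880 by omega), if_neg (show ¬ k + 1 < 3624 by omega), if_neg (show ¬ k + 1 < 4344 by omega), if_neg (show ¬ k + 1 < 5088 by omega), if_neg (show ¬ k + 1 < 5832 by omega), if_neg (show ¬ k + 1 < 6552 by omega), if_neg (show ¬ k + 1 < 7296 by omega), if_pos (show k + 1 < 8016 by omega)]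
        rw [e1, e2]; norm_num [monthStartsA, List.getD]; try omega
      · have e1 : mIdx k = 11 := by unfold mIdx; rw [if_neg (show ¬ k < 744 by omega), if_neg (show ¬ k < 1416 by omega), if_neg (show ¬ k < 2160 by omega), if_neg (show ¬ k < 2880 by omega), if_neg (show ¬ k < 3624 by omega), if_neg (show ¬ k < 4344 by omega), if_neg (show ¬ k < 5088 by omega), if_neg (show ¬ k < 5832 by omega), if_neg (show ¬ k < 6552 by omega), if_neg (show ¬ k < 7296 by omega), if_pos (show k < 8016 by omega)]
        have e2 : mIdx (k + 1) = 11 := by unfold mIdx; rw [if_neg (show ¬ k + 1 < 744 by omega), if_neg (show ¬ k + 1 < 1416 by omega), if_neg (show ¬ k + 1 < 2160 by omega), if_neg (show ¬ k + 1 < 2880 by omega), if_neg (show ¬ k + 1 < 3624 by omega), if_neg (show ¬ k + 1 < 4344 by omega), if_neg (show ¬ k + 1 < 5088 by omega), if_neg (show ¬ k + 1 < 5832 by omega), if_neg (show ¬ k + 1 < 6552 by omega), if_neg (show ¬ k + 1 < 7296 by omega), if_pos (show k + 1 < 8016 by omega)]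
        rw [e1, e2]; norm_num [monthStartsA, List.getD]; try omega
    · by_cases hb : k + 1 = 8016
      · have e1 : mIdx k = 11 := by unfold mIdx; rw [if_neg (show ¬ k < 744 by omega), if_neg (show ¬ k < 1416 by omega), if_neg (show ¬ k < 2160 by omega), if_neg (show ¬ k < 2880 by omega), if_neg (show ¬ k < 3624 by omega), if_neg (show ¬ k < 4344 by omega), if_neg (show ¬ k < 5088 by omega), if_neg (show ¬ k < 5832 by omega), if_neg (show ¬ k < 6552 by omega), if_neg (show ¬ k < 7296 by omega), if_pos (show k < 8016 by omega)]
        have e2 : mIdx (k + 1) = 12 := by unfold mIdx; rw [if_neg (show ¬ k + 1 < 744 by omega), if_neg (show ¬ k + 1 < 1416 by omega), if_neg (show ¬ k + 1 < 2160 by omega), if_neg (show ¬ k + 1 < 2880 by omega), if_neg (show ¬ k + 1 < 3624 by omega), if_neg (show ¬ k + 1 < 4344 by omega), if_neg (show ¬ k + 1 < 5088 by omega), if_neg (show ¬ k + 1 < 5832 by omega), if_neg (show ¬ k + 1 < 6552 by omega), if_neg (show ¬ k + 1 < 7296 by omega), if_neg (show ¬ k + 1 < 8016 by omega)]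
        rw [e1, e2]; norm_num [monthStartsA, List.getD]; try omega
      · have e1 : mIdx k = 12 := by unfold mIdx; rw [if_neg (show ¬ k < 744 by omega), if_neg (show ¬ k < 1416 by omega), if_neg (show ¬ k < 2160 by omega), if_neg (show ¬ k < 2880 by omega), if_neg (show ¬ k < 3624 by omega), if_neg (show ¬ k < 4344 by omega), if_neg (show ¬ k < 5088 by omega), if_neg (show ¬ k < 5832 by omega), if_neg (show ¬ k < 6552 by omega), if_neg (show ¬ k < 7296 by omega), if_neg (show ¬ k < 8016 by omega)]
        have e2 : mIdx (k + 1) = 12 := by unfold mIdx; rw [if_neg (show ¬ k + 1 < 744 by omega), if_neg (show ¬ k + 1 < 1416 by omega), if_neg (show ¬ k + 1 < 2160 by omega), if_neg (show ¬ k + 1 < 2880 by omega), if_neg (show ¬ k + 1 < 3624 by omega), if_neg (show ¬ k + 1 < 4344 by omega), if_neg (show ¬ k + 1 < 5088 by omega), if_neg (show ¬ k + 1 < 5832 by omega), if_neg (show ¬ k + 1 < 6552 by omega), if_neg (show ¬ k + 1 < 7296 by omega), if_neg (show ¬ k + 1 < 8016 by omega)]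
        rw [e1, e2]; norm_num [monthStartsA, List.getD]; try omega

lemma mIdx_char (n : Nat) :
    (mIdx n = 1 ↔ n < 744) ∧
    (mIdx n = 2 ↔ 744 ≤ n ∧ n < 1416) ∧
    (mIdx n = 3 ↔ 1416 ≤ n ∧ n < 2160) ∧
    (mIdx n = 4 ↔ 2160 ≤ n ∧ n < 2880) ∧
    (mIdx n = 5 ↔ 2880 ≤ n ∧ n < 3624) ∧
    (mIdx n = 6 ↔ 3624 ≤ n ∧ n < 4344) ∧
    (mIdx n = 7 ↔ 4344 ≤ n ∧ n < 5088) ∧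
    (mIdx n = 8 ↔ 5088 ≤ n ∧ n < 5832) ∧
    (mIdx n = 9 ↔ 5832 ≤ n ∧ n < 6552) ∧
    (mIdx n = 10 ↔ 6552 ≤ n ∧ n < 7296) ∧
    (mIdx n = 11 ↔ 7296 ≤ n ∧ n < 8016) ∧
    (mIdx n = 12 ↔ 8016 ≤ n) := by
  rcases (by omega : n < 744 ∨ (744 ≤ n ∧ n < 1416) ∨ (1416 ≤ n ∧ n < 2160) ∨ (2160 ≤ n ∧ n < 2880) ∨ (2880 ≤ n ∧ n < 3624) ∨ (3624 ≤ n ∧ n < 4344) ∨ (4344 ≤ n ∧ n < 5088) ∨ (5088 ≤ n ∧ n < 5832) ∨ (5832 ≤ n ∧ n < 6552) ∨ (6552 ≤ n ∧ n < 7296) ∨ (7296 ≤ n ∧ n < 8016) ∨ 8016 ≤ n) with h|h|h|h|h|h|h|h|h|h|h|h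
  · have e : mIdx n = 1 := by unfold mIdx; rw [if_pos (show n < 744 by omega)]
    rw [e]; omega
  · have e : mIdx n = 2 := by unfold mIdx; rw [if_neg (show ¬ n < 744 by omega), if_pos (show n < 1416 by omega)]
    rw [e]; omega
  · have e : mIdx n = 3 := by unfold mIdx; rw [if_neg (show ¬ n < 744 by omega), if_neg (show ¬ n < 1416 by omega), if_pos (show n < 2160 by omega)]
    rw [e]; omega
  · have e : mIdx n = 4 := by unfold mIdx; rw [if_neg (show ¬ n < 744 by omega), if_neg (show ¬ n < 1416 by omega), if_neg (show ¬ n < 2160 by omega), if_pos (show n < 2880 by omega)]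
    rw [e]; omega
  · have e : mIdx n = 5 := by unfold mIdx; rw [if_neg (show ¬ n < 744 by omega), if_neg (show ¬ n < 1416 by omega), if_neg (show ¬ n < 2160 by omega), if_neg (show ¬ n < 2880 by omega), if_pos (show n < 3624 by omega)]
    rw [e]; omega
  · have e : mIdx n = 6 := by unfold mIdx; rw [if_neg (show ¬ n < 744 by omega), if_neg (show ¬ n < 1416 by omega), if_neg (show ¬ n < 2160 by omega), if_neg (show ¬ n < 2880 by omega), if_neg (show ¬ n < 3624 by omega), if_pos (show n < 4344 by omega)]
    rw [e]; omega
  · have e : mIdx n = 7 := by unfold mIdx; rw [if_neg (show ¬ n < 744 by omega), if_neg (show ¬ n < 1416 by omega), if_neg (show ¬ n < 2160 by omega), if_neg (show ¬ n < 2880 by omega), if_neg (show ¬ n < 3624 by omega), if_neg (show ¬ n < 4344 by omega), if_pos (show n < 5088 by omega)]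
    rw [e]; omega
  · have e : mIdx n = 8 := by unfold mIdx; rw [if_neg (show ¬ n < 744 by omega), if_neg (show ¬ n < 1416 by omega), if_neg (show ¬ n < 2160 by omega), if_neg (show ¬ n < 2880 by omega), if_neg (show ¬ n < 3624 by omega), if_neg (show ¬ n < 4344 by omega), if_neg (show ¬ n < 5088 by omega), if_pos (show n < 5832 by omega)]
    rw [e]; omega
  · have e : mIdx n = 9 := by unfold mIdx; rw [if_neg (show ¬ n < 744 by omega), if_neg (show ¬ n < 1416 by omega), if_neg (show ¬ n < 2160 by omega), if_neg (show ¬ n < 2880 by omega), if_neg (show ¬ n < 3624 by omega), if_neg (show ¬ n < 4344 by omega), if_neg (show ¬ n < 5088 by omega), if_neg (show ¬ n < 5832 by omega), if_pos (show n < 6552 by omega)]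
    rw [e]; omega
  · have e : mIdx n = 10 := by unfold mIdx; rw [if_neg (show ¬ n < 744 by omega), if_neg (show ¬ n < 1416 by omega), if_neg (show ¬ n < 2160 by omega), if_neg (show ¬ n < 2880 by omega), if_neg (show ¬ n < 3624 by omega), if_neg (show ¬ n < 4344 by omega), if_neg (show ¬ n < 5088 by omega), if_neg (show ¬ n < 5832 by omega), if_neg (show ¬ n < 6552 by omega), if_pos (show n < 7296 by omega)]
    rw [e]; omega
  · have e : mIdx n = 11 := by unfold mIdx; rw [if_neg (show ¬ n < 744 by omega), if_neg (show ¬ n < 1416 by omega), if_neg (show ¬ n < 2160 by omega), if_neg (show ¬ n < 2880 by omega), if_neg (show ¬ n < 3624 by omega), if_neg (show ¬ n < 4344 by omega), if_neg (show ¬ n < 5088 by omega), if_neg (show ¬ n < 5832 by omega), if_neg (show ¬ n < 6552 by omega), if_neg (show ¬ n < 7296 by omega), if_pos (show n < 8016 by omega)]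
    rw [e]; omega
  · have e : mIdx n = 12 := by unfold mIdx; rw [if_neg (show ¬ n < 744 by omega), if_neg (show ¬ n < 1416 by omega), if_neg (show ¬ n < 2160 by omega), if_neg (show ¬ n < 2880 by omega), if_neg (show ¬ n < 3624 by omega), if_neg (show ¬ n < 4344 by omega), if_neg (show ¬ n < 5088 by omega), if_neg (show ¬ n < 5832 by omega), if_neg (show ¬ n < 6552 by omega), if_neg (show ¬ n < 7296 by omega), if_neg (show ¬ n < 8016 by omega)]
    rw [e]; omega

lemma chunk_snoc (xs : List Int) (x : Int) (m : Nat) (hm : m < 12) :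
    chunk (xs ++ [x]) m =
      chunk xs m ++ (if m + 1 = mIdx xs.length then [x] else []) := by
  obtain ⟨c1, c2, c3, c4, c5, c6, c7, c8, c9, c10, c11, c12⟩ := mIdx_char xs.length
  interval_cases m
  · -- m = 0
    norm_num [chunk, altStarts, List.getD]
    by_cases h2 : xs.length < 744
    · rw [List.take_of_length_le (by simp; omega), List.take_of_length_le (by omega),
        if_pos ((c1.mpr (by omega)).symm)]
    · rw [List.take_append_of_le_length (by omega), if_neg (fun hcon => by have := c1.mp hcon.symm; omega)]
      simp
  · -- m = 1
    norm_num [chunk, altStarts, List.getD]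
    by_cases h1 : xs.length < 744
    · rw [List.drop_of_length_le (by simp; omega), List.drop_of_length_le (by omega), if_neg (fun hcon => by have := c2.mp hcon.symm; omega)]
      simp
    · by_cases h2 : xs.length < 1416
      · rw [List.drop_append_of_le_length (by omega), if_pos ((c2.mpr (by omega)).symm),
          List.take_of_length_le (by simp; omega), List.take_of_length_le (by simp; omega)]
      · rw [List.drop_append_of_le_length (by omega),
          List.take_append_of_le_length (by simp; omega), if_neg (fun hcon => by have := c2.mp hcon.symm; omega)]
        simp
  · -- m = 2
    norm_num [chunk, altStarts, List.getD]
    by_cases h1 : xs.length < 1416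
    · rw [List.drop_of_length_le (by simp; omega), List.drop_of_length_le (by omega), if_neg (fun hcon => by have := c3.mp hcon.symm; omega)]
      simp
    · by_cases h2 : xs.length < 2160
      · rw [List.drop_append_of_le_length (by omega), if_pos ((c3.mpr (by omega)).symm),
          List.take_of_length_le (by simp; omega), List.take_of_length_le (by simp; omega)]
      · rw [List.drop_append_of_le_length (by omega),
          List.take_append_of_le_length (by simp; omega), if_neg (fun hcon => by have := c3.mp hcon.symm; omega)]
        simp
  · -- m = 3
    norm_num [chunk, altStarts, List.getD]
    by_cases h1 : xs.length < 2160
    · rw [List.drop_of_length_le (by simp; omega), List.drop_of_length_le (by omega), if_neg (fun hcon => by have := c4.mp hcon.symm; omega)]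
      simp
    · by_cases h2 : xs.length < 2880
      · rw [List.drop_append_of_le_length (by omega), if_pos ((c4.mpr (by omega)).symm),
          List.take_of_length_le (by simp; omega), List.take_of_length_le (by simp; omega)]
      · rw [List.drop_append_of_le_length (by omega),
          List.take_append_of_le_length (by simp; omega), if_neg (fun hcon => by have := c4.mp hcon.symm; omega)]
        simp
  · -- m = 4
    norm_num [chunk, altStarts, List.getD]
    by_cases h1 : xs.length < 2880
    · rw [List.drop_of_length_le (by simp; omega), List.drop_of_length_le (by omega), if_neg (fun hcon => by have := c5.mp hcon.symm; omega)]
      simp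
    · by_cases h2 : xs.length < 3624
      · rw [List.drop_append_of_le_length (by omega), if_pos ((c5.mpr (by omega)).symm),
          List.take_of_length_le (by simp; omega), List.take_of_length_le (by simp; omega)]
      · rw [List.drop_append_of_le_length (by omega),
          List.take_append_of_le_length (by simp; omega), if_neg (fun hcon => by have := c5.mp hcon.symm; omega)]
        simp
  · -- m = 5
    norm_num [chunk, altStarts, List.getD]
    by_cases h1 : xs.length < 3624
    · rw [List.drop_of_length_le (by simp; omega), List.drop_of_length_le (by omega), if_neg (fun hcon => by have := c6.mp hcon.symm; omega)]
      simp
    · by_cases h2 : xs.length < 4344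
      · rw [List.drop_append_of_le_length (by omega), if_pos ((c6.mpr (by omega)).symm),
          List.take_of_length_le (by simp; omega), List.take_of_length_le (by simp; omega)]
      · rw [List.drop_append_of_le_length (by omega),
          List.take_append_of_le_length (by simp; omega), if_neg (fun hcon => by have := c6.mp hcon.symm; omega)]
        simp
  · -- m = 6
    norm_num [chunk, altStarts, List.getD]
    by_cases h1 : xs.length < 4344
    · rw [List.drop_of_length_le (by simp; omega), List.drop_of_length_le (by omega), if_neg (fun hcon => by have := c7.mp hcon.symm; omega)]
      simp
    · by_cases h2 : xs.length < 5088
      · rw [List.drop_append_of_le_length (by omega), if_pos ((c7.mpr (by omega)).symm),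
          List.take_of_length_le (by simp; omega), List.take_of_length_le (by simp; omega)]
      · rw [List.drop_append_of_le_length (by omega),
          List.take_append_of_le_length (by simp; omega), if_neg (fun hcon => by have := c7.mp hcon.symm; omega)]
        simp
  · -- m = 7
    norm_num [chunk, altStarts, List.getD]
    by_cases h1 : xs.length < 5088
    · rw [List.drop_of_length_le (by simp; omega), List.drop_of_length_le (by omega), if_neg (fun hcon => by have := c8.mp hcon.symm; omega)]
      simp
    · by_cases h2 : xs.length < 5832
      · rw [List.drop_append_of_le_length (by omega), if_pos ((c8.mpr (by omega)).symm),
          List.take_of_length_le (by simp; omega), List.take_of_length_le (by simp; omega)]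
      · rw [List.drop_append_of_le_length (by omega),
          List.take_append_of_le_length (by simp; omega), if_neg (fun hcon => by have := c8.mp hcon.symm; omega)]
        simp
  · -- m = 8
    norm_num [chunk, altStarts, List.getD]
    by_cases h1 : xs.length < 5832
    · rw [List.drop_of_length_le (by simp; omega), List.drop_of_length_le (by omega), if_neg (fun hcon => by have := c9.mp hcon.symm; omega)]
      simp
    · by_cases h2 : xs.length < 6552
      · rw [List.drop_append_of_le_length (by omega), if_pos ((c9.mpr (by omega)).symm),
          List.take_of_length_le (by simp; omega), List.take_of_length_le (by simp; omega)]
      · rw [List.drop_append_of_le_length (by omega),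
          List.take_append_of_le_length (by simp; omega), if_neg (fun hcon => by have := c9.mp hcon.symm; omega)]
        simp
  · -- m = 9
    norm_num [chunk, altStarts, List.getD]
    by_cases h1 : xs.length < 6552
    · rw [List.drop_of_length_le (by simp; omega), List.drop_of_length_le (by omega), if_neg (fun hcon => by have := c10.mp hcon.symm; omega)]
      simp
    · by_cases h2 : xs.length < 7296
      · rw [List.drop_append_of_le_length (by omega), if_pos ((c10.mpr (by omega)).symm),
          List.take_of_length_le (by simp; omega), List.take_of_length_le (by simp; omega)]
      · rw [List.drop_append_of_le_length (by omega),
          List.take_append_of_le_length (by simp; omega), if_neg (fun hcon => by have := c10.mp hcon.symm; omega)]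
        simp
  · -- m = 10
    norm_num [chunk, altStarts, List.getD]
    by_cases h1 : xs.length < 7296
    · rw [List.drop_of_length_le (by simp; omega), List.drop_of_length_le (by omega), if_neg (fun hcon => by have := c11.mp hcon.symm; omega)]
      simp
    · by_cases h2 : xs.length < 8016
      · rw [List.drop_append_of_le_length (by omega), if_pos ((c11.mpr (by omega)).symm),
          List.take_of_length_le (by simp; omega), List.take_of_length_le (by simp; omega)]
      · rw [List.drop_append_of_le_length (by omega),
          List.take_append_of_le_length (by simp; omega), if_neg (fun hcon => by have := c11.mp hcon.symm; omega)]
        simp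
  · -- m = 11
    norm_num [chunk, altStarts, List.getD]
    by_cases h1 : xs.length < 8016
    · rw [List.drop_of_length_le (by simp; omega), List.drop_of_length_le (by omega), if_neg (fun hcon => by have := c12.mp hcon.symm; omega)]
      simp
    · rw [List.drop_append_of_le_length (by omega), if_pos ((c12.mpr (by omega)).symm),
        List.take_of_length_le (by simp; try omega), List.take_of_length_le (by simp; try omega)]

lemma foldl_snoc_map {α β : Type} (l : List α) (f : α → β) (acc : List β) :
    l.foldl (fun acc m => acc ++ [f m]) acc = acc ++ l.map f := by
  induction l generalizing acc with
  | nil => simp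
  | cons a l ih => simp [ih]

lemma alt_eq_bPeaks (xs : List Int) : peak_loads_from_hourly_alt xs = bPeaks xs := by
  unfold peak_loads_from_hourly_alt bPeaks chunk
  rw [foldl_snoc_map, List.nil_append]

lemma mIdx_bounds (n : Nat) : 1 ≤ mIdx n ∧ mIdx n ≤ 12 := by
  obtain ⟨c1, c2, c3, c4, c5, c6, c7, c8, c9, c10, c11, c12⟩ := mIdx_char n
  rcases (by omega : n < 744 ∨ (744 ≤ n ∧ n < 1416) ∨ (1416 ≤ n ∧ n < 2160) ∨ (2160 ≤ n ∧ n < 2880) ∨ (2880 ≤ n ∧ n < 3624) ∨ (3624 ≤ n ∧ n < 4344) ∨ (4344 ≤ n ∧ n < 5088) ∨ (5088 ≤ n ∧ n < 5832) ∨ (5832 ≤ n ∧ n < 6552) ∨ (6552 ≤ n ∧ n < 7296) ∨ (7296 ≤ n ∧ n < 8016) ∨ 8016 ≤ n) with h|h|h|h|h|h|h|h|h|h|h|h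
  · have := c1.mpr (by omega); omega
  · have := c2.mpr (by omega); omega
  · have := c3.mpr (by omega); omega
  · have := c4.mpr (by omega); omega
  · have := c5.mpr (by omega); omega
  · have := c6.mpr (by omega); omega
  · have := c7.mpr (by omega); omega
  · have := c8.mpr (by omega); omega
  · have := c9.mpr (by omega); omega
  · have := c10.mpr (by omega); omega
  · have := c11.mpr (by omega); omega
  · have := c12.mpr (by omega); omega

lemma getD_map_range {β : Type} (g : Nat → β) (k i : Nat) (d : β) (h : i < k) :
    ((List.range k).map g).getD i d = g i := by
  simp [List.getD, h]

lemma bPeaks_snoc (xs : List Int) (x : Int) :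
    bPeaks (xs ++ [x]) =
      (if x > (bPeaks xs).getD (mIdx xs.length - 1) 0
       then (bPeaks xs).set (mIdx xs.length - 1) x else bPeaks xs) := by
  obtain ⟨hm1, hm2⟩ := mIdx_bounds xs.length
  have hmap : bPeaks (xs ++ [x]) = (List.range 12).map
      (fun m => if m + 1 = mIdx xs.length
        then max ((chunk xs m).foldl (fun a v => max a v) 0) x
        else (chunk xs m).foldl (fun a v => max a v) 0) := by
    unfold bPeaks
    refine List.map_congr_left ?_
    intro m hm
    rw [chunk_snoc xs x m (List.mem_range.mp hm)]
    by_cases hc : m + 1 = mIdx xs.length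
    · rw [if_pos hc, if_pos hc, List.foldl_append]; simp
    · rw [if_neg hc, if_neg hc]; simp
  have hget : (bPeaks xs).getD (mIdx xs.length - 1) 0
      = (chunk xs (mIdx xs.length - 1)).foldl (fun a v => max a v) 0 := by
    unfold bPeaks; rw [getD_map_range]; omega
  rw [hmap, hget]
  by_cases hx : x > (chunk xs (mIdx xs.length - 1)).foldl (fun a v => max a v) 0
  · rw [if_pos hx]
    unfold bPeaks
    apply List.ext_getElem (by simp)
    intro j h1 h2
    simp only [List.getElem_map, List.getElem_range, List.getElem_set]
    by_cases hj : j + 1 = mIdx xs.length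
    · rw [if_pos hj, if_pos (by omega : mIdx xs.length - 1 = j)]
      have : j = mIdx xs.length - 1 := by omega
      subst this
      exact max_eq_right (le_of_lt hx)
    · rw [if_neg hj, if_neg (by omega : ¬ mIdx xs.length - 1 = j)]
  · rw [if_neg hx]
    unfold bPeaks
    refine List.map_congr_left ?_
    intro m hm
    by_cases hc : m + 1 = mIdx xs.length
    · rw [if_pos hc]
      have : m = mIdx xs.length - 1 := by omega
      subst this
      exact max_eq_left (not_lt.mp hx)
    · rw [if_neg hc]

lemma aFold_eq (xs : List Int) :
    (List.range xs.length).foldl (stepA xs) (1, List.replicate 12 0)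
      = (mState xs.length, bPeaks xs) := by
  induction xs using List.reverseRecOn with
  | nil => decide
  | append_singleton xs x ih =>
    have hlen : (xs ++ [x]).length = xs.length + 1 := by simp
    rw [hlen, List.range_succ, List.foldl_append]
    have hcong : (List.range xs.length).foldl (stepA (xs ++ [x])) (1, List.replicate 12 0)
        = (List.range xs.length).foldl (stepA xs) (1, List.replicate 12 0) := by
      apply PySem.List.foldl_congr_mem
      intro acc i hi
      have hilt : i < xs.length := List.mem_range.mp hi
      unfold stepA
      rw [List.getD_append _ _ _ _ hilt]
    rw [hcong, ih]
    simp only [List.foldl_cons, List.foldl_nil]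
    unfold stepA
    rw [step_month xs.length]
    have hv : (xs ++ [x]).getD xs.length 0 = x := by
      simp [List.getD]
    rw [hv, bPeaks_snoc]
    have hms : mState (xs.length + 1) = mIdx xs.length := by simp [mState]
    rw [hms]
    by_cases hx : x > (bPeaks xs).getD (mIdx xs.length - 1) 0
    · rw [if_pos hx, if_pos hx]
    · rw [if_neg hx, if_neg hx]

-- ===== VERDICT (by name: the statement is the Claim_ definition above) =====
theorem peak_loads_from_hourly_spec : Claim_equal_peak_loads_from_hourly := by
  intro xs _
  unfold Spec_peak_loads_from_hourly
  rw [alt_eq_bPeaks, peak_loads_from_hourly, aFold_eq]
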